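-- pv_equiv track=rewrite | github.com/asarandi/wordscapes-bot | script.py | build_moves
-- ===== SOURCE A (Python) =====
-- def build_moves(word: str, positions: [tuple]) -> [tuple]:
--     res = []
--     for k in list(word.upper()):
--         for letter, (px, py) in positions:
--             if letter == k and (px, py) not in res:
--                 res.append((px, py))
--                 break
--     return res
-- ===== SOURCE B (Python) =====
-- def build_moves(word: str, positions: [tuple]) -> [tuple]:
--     # per-letter queues, consumed destructively; spent coordinates are lazily discarded
--     buckets = {}
--     for letter, pos in positions:
--         buckets.setdefault(letter, []).append(pos)
--     res = []
--     used = set()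
--     for k in word.upper():
--         q = buckets.get(k)
--         if not q:
--             continue
--         while q and q[0] in used:
--             q.pop(0)
--         if q:
--             p = q.pop(0)
--             res.append(p)
--             used.add(p)
--     return res
-- ===== Notes on version B (the rewrite author's own statement) =====
-- stated objective: faster
-- what changed: B maintains a mutable per-letter queue of coordinates that is consumed destructively with lazy deletion of already-used coordinates (each board position is examined and discarded at most once across the whole run, with a shared used-set for cross-letter blocking), instead of A's rescan of the entire positions list plus a linear 'not in res' test for every letter of the word.
import Mathlib
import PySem

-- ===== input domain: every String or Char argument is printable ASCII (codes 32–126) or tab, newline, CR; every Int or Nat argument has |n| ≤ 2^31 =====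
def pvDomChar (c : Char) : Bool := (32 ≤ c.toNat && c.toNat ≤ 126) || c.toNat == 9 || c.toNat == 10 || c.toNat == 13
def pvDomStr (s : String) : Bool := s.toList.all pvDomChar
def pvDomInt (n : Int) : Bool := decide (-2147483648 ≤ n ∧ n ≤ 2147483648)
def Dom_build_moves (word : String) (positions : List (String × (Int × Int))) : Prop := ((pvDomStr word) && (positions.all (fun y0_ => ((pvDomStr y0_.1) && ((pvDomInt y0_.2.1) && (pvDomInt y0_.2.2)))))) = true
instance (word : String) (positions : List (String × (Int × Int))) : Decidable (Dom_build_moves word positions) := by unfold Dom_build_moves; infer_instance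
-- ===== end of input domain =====

-- B consumes per-letter coordinate queues destructively with lazy deletion of used coordinates, replacing A's per-letter rescan of the whole positions list; return value proved equal on all inputs.


-- ===== PORT A =====
-- inner 'for letter, (px, py) in positions: … break' loop of A
def bmInnerA (k : String) (res : List (Int × Int)) : List (String × (Int × Int)) → List (Int × Int)
  | [] => res
  | (letter, p) :: rest =>
    if letter == k && !(res.contains p) then res ++ [p] else bmInnerA k res rest

def build_moves (word : String) (positions : List (String × (Int × Int))) : List (Int × Int) :=
  (PySem.Str.upper word).toList.foldl (fun res k => bmInnerA (String.singleton k) res positions) []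

-- ===== PORT B =====
-- buckets: one pass with setdefault+append (= modify with default [])
def bmIndex (positions : List (String × (Int × Int))) : PySem.Dict String (List (Int × Int)) :=
  positions.foldl (fun d p => d.modify p.1 [] (· ++ [p.2])) PySem.Dict.empty

-- 'while q and q[0] in used: q.pop(0)' — lazy deletion of spent coordinates
def bmDrop (used : PySem.Set (Int × Int)) : List (Int × Int) → List (Int × Int)
  | [] => []
  | p :: rest => if PySem.Set.contains used p then bmDrop used rest else p :: rest

-- loop state: (mutable buckets, used set, res); q.pop(0) on the alias = write the suffix back
def bmStepB (st : PySem.Dict String (List (Int × Int)) × PySem.Set (Int × Int) × List (Int × Int))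
    (k : Char) : PySem.Dict String (List (Int × Int)) × PySem.Set (Int × Int) × List (Int × Int) :=
  let s := String.singleton k
  match st.1.get? s with
  | none => st                                   -- 'if not q: continue' (key absent)
  | some q0 =>
    match bmDrop st.2.1 q0 with
    | [] => (st.1.insert s [], st.2.1, st.2.2)   -- queue drained by the while loop
    | p :: rest => (st.1.insert s rest, PySem.Set.add st.2.1 p, st.2.2 ++ [p])

def build_moves_alt (word : String) (positions : List (String × (Int × Int))) : List (Int × Int) :=
  ((PySem.Str.upper word).toList.foldl bmStepB (bmIndex positions, PySem.Set.empty, [])).2.2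

-- ===== PRECONDITION & SPEC =====
def Spec_build_moves (word : String) (positions : List (String × (Int × Int))) (out : List (Int × Int)) : Prop := out = build_moves_alt word positions
instance (word : String) (positions : List (String × (Int × Int))) (out : List (Int × Int)) : Decidable (Spec_build_moves word positions out) := by unfold Spec_build_moves; infer_instance

-- ===== CLAIM =====
def Claim_equal_build_moves : Prop := ∀ (word : String) (positions : List (String × (Int × Int))), Dom_build_moves word positions → Spec_build_moves word positions (build_moves word positions)

-- ===== LEMMAS AND PROOFS =====

-- full bucket of letter s: the s-entries of positions, in order
def bmFull (positions : List (String × (Int × Int))) (s : String) : List (Int × Int) :=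
  (positions.filter (fun p => p.1 == s)).map (·.2)

-- first element not in 'used'
def bmPick (used : PySem.Set (Int × Int)) : List (Int × Int) → Option (Int × Int)
  | [] => none
  | p :: rest => if PySem.Set.contains used p then bmPick used rest else some p

lemma bmIndex_getD (positions : List (String × (Int × Int))) (s : String) :
    (bmIndex positions).getD s [] = bmFull positions s := by
  unfold bmIndex bmFull
  rw [PySem.Dict.getD_foldl_modify_append]
  simp

-- A's inner scan = bmPick on the full bucket, given used ↔ res membership
lemma bmInnerA_eq (k : String) (ps : List (String × (Int × Int)))
    (res : List (Int × Int)) (used : PySem.Set (Int × Int))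
    (h : ∀ p, PySem.Set.contains used p = res.contains p) :
    bmInnerA k res ps =
      match bmPick used (bmFull ps k) with
      | none => res
      | some p => res ++ [p] := by
  induction ps with
  | nil => simp [bmInnerA, bmPick, bmFull]
  | cons hd tl ih =>
    obtain ⟨letter, p⟩ := hd
    have hu : (p ∈ used) ↔ (p ∈ res) := by
      have := h p; simpa [PySem.Set.contains] using this
    by_cases hl : letter == k
    · by_cases hc : p ∈ res
      · simpa [bmInnerA, bmPick, bmFull, hl, hc, hu] using ih
      · simp [bmInnerA, bmPick, bmFull, hl, hc, hu]
    · simpa [bmInnerA, bmFull, hl] using ih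

lemma bmUsed_add (used : PySem.Set (Int × Int)) (res : List (Int × Int)) (p : Int × Int)
    (h : ∀ q, PySem.Set.contains used q = res.contains q) :
    ∀ q, PySem.Set.contains (PySem.Set.add used p) q = (res ++ [p]).contains q := by
  intro q
  have h' : ∀ r, (r ∈ used) ↔ (r ∈ res) := fun r => by
    have := h r; simpa [PySem.Set.contains] using this
  by_cases hp : p ∈ used
  · by_cases hq : q = p <;> simp_all [PySem.Set.add, PySem.Set.contains]
  · by_cases hq : q = p <;> simp_all [PySem.Set.add, PySem.Set.contains]

-- the while loop splits the queue into a used prefix and the rest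
lemma bmDrop_split (used : PySem.Set (Int × Int)) (q : List (Int × Int)) :
    ∃ dr, q = dr ++ bmDrop used q ∧ ∀ p ∈ dr, p ∈ used := by
  induction q with
  | nil => exact ⟨[], rfl, by simp⟩
  | cons p rest ih =>
    by_cases hp : p ∈ used
    · obtain ⟨dr, he, hm⟩ := ih
      refine ⟨p :: dr, ?_, ?_⟩
      · simp only [bmDrop, PySem.Set.contains]
        simp [hp, ← he]
      · intro x hx
        rcases List.mem_cons.mp hx with h1 | h1
        · subst h1; exact hp
        · exact hm x h1
    · refine ⟨[], ?_, by simp⟩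
      simp only [bmDrop, PySem.Set.contains]
      simp [hp]

lemma bmDrop_head (used : PySem.Set (Int × Int)) (q : List (Int × Int)) (p : Int × Int)
    (rest : List (Int × Int)) (h : bmDrop used q = p :: rest) : p ∉ used := by
  induction q with
  | nil => simp [bmDrop] at h
  | cons a as ih =>
    by_cases ha : a ∈ used
    · apply ih
      rw [← h]
      simp only [bmDrop, PySem.Set.contains]
      simp [ha]
    · have he : bmDrop used (a :: as) = a :: as := by
        simp only [bmDrop, PySem.Set.contains]
        simp [ha]
      rw [he] at h
      rw [← (List.cons.inj h).1]; exact ha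

lemma bmPick_append (used : PySem.Set (Int × Int)) (l1 l2 : List (Int × Int))
    (h : ∀ p ∈ l1, p ∈ used) :
    bmPick used (l1 ++ l2) = bmPick used l2 := by
  induction l1 with
  | nil => rfl
  | cons a as ih =>
    have ha : a ∈ used := h a (by simp)
    have : bmPick used ((a :: as) ++ l2) = bmPick used (as ++ l2) := by
      simp only [bmPick, PySem.Set.contains, List.cons_append]
      simp [ha]
    rw [this]
    exact ih (fun p hp => h p (by simp [hp]))

-- invariant: used tracks res as a set, and every bucket is a suffix of its full
-- bucket whose dropped prefix lies entirely in res
def bmInv (positions : List (String × (Int × Int)))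
    (d : PySem.Dict String (List (Int × Int))) (used : PySem.Set (Int × Int))
    (res : List (Int × Int)) : Prop :=
  (∀ p, PySem.Set.contains used p = res.contains p) ∧
  ∀ s, ∃ pre, bmFull positions s = pre ++ d.getD s [] ∧ ∀ p ∈ pre, p ∈ res

lemma bmStep_eq (positions : List (String × (Int × Int))) (k : Char)
    (d : PySem.Dict String (List (Int × Int))) (used : PySem.Set (Int × Int))
    (res : List (Int × Int)) (hinv : bmInv positions d used res) :
    (bmStepB (d, used, res) k).2.2 = bmInnerA (String.singleton k) res positions ∧
    bmInv positions (bmStepB (d, used, res) k).1 (bmStepB (d, used, res) k).2.1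
      (bmStepB (d, used, res) k).2.2 := by
  obtain ⟨hused, hbuck⟩ := hinv
  set s := String.singleton k with hs
  obtain ⟨pre, hfull, hpre⟩ := hbuck s
  have hres_used : ∀ p, p ∈ res → p ∈ used := by
    intro p hp
    have := hused p
    simp [PySem.Set.contains] at this
    exact this.mpr hp
  have hused_res : ∀ p, p ∈ used → p ∈ res := by
    intro p hp
    have := hused p
    simp [PySem.Set.contains] at this
    exact this.mp hp
  rw [bmInnerA_eq s positions res used hused]
  cases hg : d.get? s with
  | none =>
    have hstep : bmStepB (d, used, res) k = (d, used, res) := by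
      simp [bmStepB, ← hs, hg]
    have hq : d.getD s [] = [] := PySem.Dict.getD_of_get?_eq_none d [] hg
    rw [hq, List.append_nil] at hfull
    have hpick : bmPick used (bmFull positions s) = none := by
      rw [hfull, ← List.append_nil pre,
        bmPick_append used pre [] (fun p hp => hres_used p (hpre p hp))]
      rfl
    rw [hstep]
    exact ⟨by simp [hpick], hused, hbuck⟩
  | some q0 =>
    have hq : d.getD s [] = q0 := PySem.Dict.getD_of_get?_eq_some d [] hg
    rw [hq] at hfull
    obtain ⟨dr, hdr, hdrm⟩ := bmDrop_split used q0
    cases hd : bmDrop used q0 with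
    | nil =>
      have hstep : bmStepB (d, used, res) k = (d.insert s [], used, res) := by
        simp [bmStepB, ← hs, hg, hd]
      rw [hd, List.append_nil] at hdr; subst hdr
      have hall : ∀ p ∈ pre ++ q0, p ∈ used := by
        intro p hp
        rcases List.mem_append.mp hp with h1 | h1
        · exact hres_used p (hpre p h1)
        · exact hdrm p h1
      have hpick : bmPick used (bmFull positions s) = none := by
        rw [hfull, ← List.append_nil (pre ++ q0), bmPick_append used _ [] hall]
        rfl
      rw [hstep]
      refine ⟨by simp [hpick], hused, ?_⟩
      intro t
      by_cases ht : t = s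
      · subst ht
        refine ⟨pre ++ q0, ?_, ?_⟩
        · rw [PySem.Dict.getD_insert_self]; simpa using hfull
        · intro p hp
          rcases List.mem_append.mp hp with h1 | h1
          · exact hpre p h1
          · exact hused_res p (hdrm p h1)
      · obtain ⟨pr, h1, h2⟩ := hbuck t
        exact ⟨pr, by rwa [PySem.Dict.getD_insert_of_ne d [] [] ht], h2⟩
    | cons p rest =>
      have hstep : bmStepB (d, used, res) k =
          (d.insert s rest, PySem.Set.add used p, res ++ [p]) := by
        simp [bmStepB, ← hs, hg, hd]
      rw [hd] at hdr
      have hpnot : p ∉ used := bmDrop_head used q0 p rest hd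
      have hpick : bmPick used (bmFull positions s) = some p := by
        rw [hfull, hdr, show pre ++ (dr ++ p :: rest) = (pre ++ dr) ++ (p :: rest) by simp,
          bmPick_append used (pre ++ dr) (p :: rest) ?hall]
        · simp only [bmPick, PySem.Set.contains]
          simp [hpnot]
        · intro x hx
          rcases List.mem_append.mp hx with h1 | h1
          · exact hres_used x (hpre x h1)
          · exact hdrm x h1
      rw [hstep]
      refine ⟨by simp [hpick], bmUsed_add used res p hused, ?_⟩
      intro t
      by_cases ht : t = s
      · subst ht
        refine ⟨pre ++ dr ++ [p], ?_, ?_⟩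
        · rw [PySem.Dict.getD_insert_self, hfull, hdr]; simp
        · intro x hx
          rcases List.mem_append.mp hx with h1 | h1
          · rcases List.mem_append.mp h1 with h2 | h2
            · exact List.mem_append.mpr (Or.inl (hpre x h2))
            · exact List.mem_append.mpr (Or.inl (hused_res x (hdrm x h2)))
          · simp at h1; simp [h1]
      · obtain ⟨pr, h1, h2⟩ := hbuck t
        refine ⟨pr, by rwa [PySem.Dict.getD_insert_of_ne d rest [] ht], ?_⟩
        intro x hx
        exact List.mem_append.mpr (Or.inl (h2 x hx))

lemma bmLoop_eq (positions : List (String × (Int × Int))) :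
    ∀ (ks : List Char) (d : PySem.Dict String (List (Int × Int)))
      (used : PySem.Set (Int × Int)) (res : List (Int × Int)),
    bmInv positions d used res →
    (ks.foldl bmStepB (d, used, res)).2.2 =
      ks.foldl (fun r k => bmInnerA (String.singleton k) r positions) res := by
  intro ks
  induction ks with
  | nil => intro d used res _; rfl
  | cons k tl ih =>
    intro d used res h
    obtain ⟨heq, hinv⟩ := bmStep_eq positions k d used res h
    simp only [List.foldl_cons]
    have := ih (bmStepB (d, used, res) k).1 (bmStepB (d, used, res) k).2.1
      (bmStepB (d, used, res) k).2.2 hinv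
    rw [← heq]
    simpa using this

-- ===== VERDICT =====
theorem build_moves_spec : Claim_equal_build_moves := by
  intro word positions _
  unfold Spec_build_moves build_moves build_moves_alt
  refine (bmLoop_eq positions (PySem.Str.upper word).toList (bmIndex positions)
    PySem.Set.empty [] ⟨?_, ?_⟩).symm
  · intro p; simp [PySem.Set.empty, PySem.Set.contains]
  · intro s; exact ⟨[], by simp [bmIndex_getD], by simp⟩
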